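-- pv_equiv track=rewrite | github.com/zhengzaiyi/AmazonReviews2023 | GRPO/models/main_zeroshot.py | extract_recaller_from_response
-- ===== SOURCE A (Python) =====
-- from typing import Dict, List
--
-- def extract_recaller_from_response(response: str, recaller_names: List[str]) -> str:
--     """Extract recaller name from model response"""
--     response_lower = response.lower().strip()
--     # Try exact match first
--     for name in recaller_names:
--         if name.lower() == response_lower:
--             return name
--     # Try substring match
--     for name in recaller_names:
--         if name.lower() in response_lower:
--             return name
--     return None
-- ===== SOURCE B (Python) =====
-- def extract_recaller_from_response(response, recaller_names):
--     """Extract recaller name from model response (single scan)."""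
--     response_lower = response.lower().strip()
--     substring_candidate = None
--     for name in recaller_names:
--         name_lower = name.lower()
--         if name_lower == response_lower:
--             return name
--         if substring_candidate is None and name_lower in response_lower:
--             substring_candidate = name
--     return substring_candidate
-- ===== Notes on version B (the rewrite author's own statement) =====
-- stated objective: alternative
-- what changed: Replaced A's two sequential passes (exact-match scan, then substring scan) by a single scan that returns immediately on an exact match while remembering the first substring match in an accumulator returned at the end.
import Mathlib
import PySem

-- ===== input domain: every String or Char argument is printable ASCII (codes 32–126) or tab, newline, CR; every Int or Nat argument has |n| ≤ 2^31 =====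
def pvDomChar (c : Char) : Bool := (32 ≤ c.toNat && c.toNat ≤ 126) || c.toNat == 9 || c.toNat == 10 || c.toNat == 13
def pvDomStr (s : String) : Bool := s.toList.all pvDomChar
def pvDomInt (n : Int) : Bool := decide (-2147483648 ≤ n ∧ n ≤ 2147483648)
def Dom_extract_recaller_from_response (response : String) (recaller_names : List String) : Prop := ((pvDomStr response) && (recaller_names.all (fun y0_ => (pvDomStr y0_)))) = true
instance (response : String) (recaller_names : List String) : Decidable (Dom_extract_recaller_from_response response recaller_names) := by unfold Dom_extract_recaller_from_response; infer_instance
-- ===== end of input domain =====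

-- ===== PORT A =====
-- first loop of A: exact match
def pvA_exact (rl : String) : List String → Option String
  | [] => none
  | n :: rest => if PySem.Str.lower n == rl then some n else pvA_exact rl rest

-- second loop of A: substring match
def pvA_sub (rl : String) : List String → Option String
  | [] => none
  | n :: rest => if PySem.Str.isIn (PySem.Str.lower n) rl then some n else pvA_sub rl rest

def extract_recaller_from_response (response : String) (recaller_names : List String) : Option String :=
  let response_lower := PySem.Str.strip (PySem.Str.lower response)
  match pvA_exact response_lower recaller_names with
  | some n => some n
  | none => pvA_sub response_lower recaller_names

-- ===== PORT B =====
-- B: one scan, returning on exact match, remembering the first substring match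
def pvB_scan (rl : String) (cand : Option String) : List String → Option String
  | [] => cand
  | n :: rest =>
    let nl := PySem.Str.lower n
    if nl == rl then some n
    else pvB_scan rl (if cand.isNone && PySem.Str.isIn nl rl then some n else cand) rest

def extract_recaller_from_response_alt (response : String) (recaller_names : List String) : Option String :=
  pvB_scan (PySem.Str.strip (PySem.Str.lower response)) none recaller_names

-- ===== PRECONDITION & SPEC =====
def Spec_extract_recaller_from_response (response : String) (recaller_names : List String) (out : Option String) : Prop := out = extract_recaller_from_response_alt response recaller_names
instance (response : String) (recaller_names : List String) (out : Option String) : Decidable (Spec_extract_recaller_from_response response recaller_names out) := by unfold Spec_extract_recaller_from_response; infer_instance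

-- ===== CLAIM (what is proved, stated in full; the proofs are below) =====
def Claim_equal_extract_recaller_from_response : Prop := ∀ (response : String) (recaller_names : List String), Dom_extract_recaller_from_response response recaller_names → Spec_extract_recaller_from_response response recaller_names (extract_recaller_from_response response recaller_names)

-- ===== LEMMAS AND PROOFS =====

-- ===== VERDICT (by name: the statement is the Claim_ definition above) =====
lemma pvB_scan_eq (rl : String) (xs : List String) (cand : Option String) :
    pvB_scan rl cand xs =
      match pvA_exact rl xs with
      | some n => some n
      | none => match cand with
                | some c => some c
                | none => pvA_sub rl xs := by
  induction xs generalizing cand with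
  | nil => cases cand <;> simp [pvB_scan, pvA_exact, pvA_sub]
  | cons n rest ih =>
    simp only [pvB_scan, pvA_exact, pvA_sub]
    by_cases hx : (PySem.Str.lower n == rl) = true
    · simp [hx]
    · simp only [hx, if_false, Bool.false_eq_true]
      rw [ih]
      cases cand with
      | some c => simp
      | none =>
        cases pvA_exact rl rest
        · by_cases hs : PySem.Chars.isIn (PySem.Chars.lower n.toList) rl.toList = true <;> simp [hs]
        · rfl

theorem extract_recaller_from_response_spec : Claim_equal_extract_recaller_from_response := by
  intro response names _
  unfold Spec_extract_recaller_from_response extract_recaller_from_response extract_recaller_from_response_alt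
  rw [pvB_scan_eq]
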